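-- pv_equiv track=rewrite | github.com/rresendepinto/PseudoViz | utils.py | find_stop_codon2
-- ===== SOURCE A (Python) =====
-- def find_stop_codon2(seq1, refseq2):
--
--     stopcodons = {'TAA', 'TAG', 'TGA'}
--
--     stop_list = []
--     #find where reference sequence actually starts, i.e. after any possible leading gaps
--     start_of_ref = 0
--     while refseq2[start_of_ref] == '-':
--         start_of_ref += 1
--     #get indices of gaps in the reference sequence
--     indices = [i for i, x in enumerate(refseq2) if x == "-" and i > start_of_ref]
--
--     #now search the target sequence with gaps for stop codons
--     for p in range(0, len(seq1), 3):
--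
--         if p != len(seq1) - 3:
--
--             if seq1[p : p + 3] in stopcodons:
--                 #add the stop codons to the list but subtract the number of gaps in the reference sequence before the stop codon
--                 stop_list.append(p + 1 - len([x for x in indices if x < p + 1]))
--
--     return(stop_list)
-- ===== SOURCE B (Python) =====
-- def find_stop_codon2(seq1, refseq2):
--     # start of reference = index of the first non-gap character (len if none)
--     start_of_ref = next((i for i, x in enumerate(refseq2) if x != '-'), len(refseq2))
--     # ascending gap indices after the reference start
--     gaps = [i for i, x in enumerate(refseq2) if x == '-' and i > start_of_ref]
--
--     out = []
--     removed = 0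
--     n = len(seq1)
--     for p in range(0, n, 3):
--         # two-pointer merge: consume the gap indices lying before this codon
--         # once and for all instead of re-filtering the whole list per codon
--         while gaps and gaps[0] < p + 1:
--             gaps = gaps[1:]
--             removed += 1
--         codon = seq1[p:p + 3]
--         if p != n - 3 and codon in ('TAA', 'TAG', 'TGA'):
--             out.append(p + 1 - removed)
--     return out
-- ===== Notes on version B (the rewrite author's own statement) =====
-- stated objective: alternative
-- what changed: Replaces A's per-codon re-filtering of the whole gap-index list with a two-pointer merge: the ascending gap list is consumed once while the codon positions advance, a running 'removed' counter standing in for the per-codon count.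
import Mathlib
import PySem

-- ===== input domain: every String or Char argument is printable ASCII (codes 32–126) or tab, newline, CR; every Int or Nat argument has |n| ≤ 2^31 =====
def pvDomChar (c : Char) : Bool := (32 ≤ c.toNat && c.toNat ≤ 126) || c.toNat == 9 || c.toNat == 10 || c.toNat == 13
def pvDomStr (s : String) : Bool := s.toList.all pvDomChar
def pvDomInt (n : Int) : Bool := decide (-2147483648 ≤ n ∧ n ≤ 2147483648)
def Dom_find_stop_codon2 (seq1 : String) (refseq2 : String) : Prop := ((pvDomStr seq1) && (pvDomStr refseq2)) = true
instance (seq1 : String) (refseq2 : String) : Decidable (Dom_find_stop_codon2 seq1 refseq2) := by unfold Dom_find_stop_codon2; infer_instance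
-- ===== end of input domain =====

-- B replaces A's per-codon re-filtering of the gap-index list with a two-pointer merge
-- that consumes the ascending gap list once, keeping a running 'removed' counter.

-- ===== PORT A =====
-- while refseq2[start_of_ref] == '-': start_of_ref += 1   (index walk = count of leading '-'; Pre_ excludes the all-'-' IndexError)
def pvAStart : List Char → Nat
  | [] => 0
  | c :: rest => if c = '-' then pvAStart rest + 1 else 0

def find_stop_codon2 (seq1 : String) (refseq2 : String) : List Int :=
  let s := seq1.toList
  let r := refseq2.toList
  let start_of_ref : Int := (pvAStart r : Int)
  -- indices = [i for i, x in enumerate(refseq2) if x == "-" and i > start_of_ref]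
  let indices : List Int :=
    ((PySem.List.enumerate r 0).filter (fun q => q.2 == '-' && decide (start_of_ref < q.1))).map (·.1)
  (PySem.List.pyRange 0 (s.length : Int) 3).foldl (fun stop_list p =>
      if p ≠ (s.length : Int) - 3 then
        if PySem.List.slice s (some p) (some (p + 3)) = "TAA".toList ∨
           PySem.List.slice s (some p) (some (p + 3)) = "TAG".toList ∨
           PySem.List.slice s (some p) (some (p + 3)) = "TGA".toList then
          stop_list ++ [p + 1 - ((indices.filter (fun x => decide (x < p + 1))).length : Int)]
        else stop_list
      else stop_list) []

-- ===== PORT B =====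
-- while gaps and gaps[0] < bound: gaps = gaps[1:]; removed += 1
-- (returns the number of dropped elements together with the remaining suffix)
def pvAdvance (bound : Int) : List Int → Nat × List Int
  | [] => (0, [])
  | g :: rest =>
    if g < bound then
      let a := pvAdvance bound rest
      (a.1 + 1, a.2)
    else (0, g :: rest)

def find_stop_codon2_alt (seq1 : String) (refseq2 : String) : List Int :=
  let s := seq1.toList
  let r := refseq2.toList
  -- start_of_ref = next((i for i, x in enumerate(refseq2) if x != '-'), len(refseq2))
  let start_of_ref : Int := (((r.findIdx? (fun c => c != '-')).getD r.length : Nat) : Int)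
  let gaps0 : List Int :=
    ((PySem.List.enumerate r 0).filter (fun q => q.2 == '-' && decide (start_of_ref < q.1))).map (·.1)
  let res := (PySem.List.pyRange 0 (s.length : Int) 3).foldl
    (fun (st : List Int × Int × List Int) p =>
      let a := pvAdvance (p + 1) st.1
      let removed : Int := st.2.1 + (a.1 : Int)
      let codon := PySem.List.slice s (some p) (some (p + 3))
      if p ≠ (s.length : Int) - 3 ∧ codon ∈ ["TAA".toList, "TAG".toList, "TGA".toList] then
        (a.2, removed, st.2.2 ++ [p + 1 - removed])
      else (a.2, removed, st.2.2))
    (gaps0, 0, [])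
  res.2.2

-- ===== PRECONDITION & SPEC =====
-- Pre_ excludes exactly the inputs where A's leading-gap while loop runs off the end of
-- refseq2 and raises IndexError: refseq2 consisting only of '-' (including empty).
def Pre_find_stop_codon2 (seq1 : String) (refseq2 : String) : Prop :=
  refseq2.toList.any (fun c => c != '-') = true
instance (seq1 : String) (refseq2 : String) : Decidable (Pre_find_stop_codon2 seq1 refseq2) := by
  unfold Pre_find_stop_codon2; infer_instance

def pvWitness_find_stop_codon2 : String × String := ("TAAACG", "-AC-GT")

def Spec_find_stop_codon2 (seq1 : String) (refseq2 : String) (out : List Int) : Prop := out = find_stop_codon2_alt seq1 refseq2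
instance (seq1 : String) (refseq2 : String) (out : List Int) : Decidable (Spec_find_stop_codon2 seq1 refseq2 out) := by unfold Spec_find_stop_codon2; infer_instance

-- ===== CLAIM (what is proved, stated in full; the proofs are below) =====
def Claim_equal_find_stop_codon2 : Prop := ∀ (seq1 : String) (refseq2 : String), Dom_find_stop_codon2 seq1 refseq2 → Pre_find_stop_codon2 seq1 refseq2 → Spec_find_stop_codon2 seq1 refseq2 (find_stop_codon2 seq1 refseq2)

-- ===== LEMMAS AND PROOFS =====

-- the two start-of-reference computations agree
lemma pvStart_eq (l : List Char) :
    pvAStart l = (l.findIdx? (fun c => c != '-')).getD l.length := by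
  induction l with
  | nil => rfl
  | cons c rest ih =>
    by_cases hc : c = '-'
    · subst hc
      simp only [pvAStart, List.findIdx?_cons]
      norm_num
      cases h : rest.findIdx? (fun c => c != '-') <;> simp [h, ih]
    · simp [pvAStart, hc, List.findIdx?_cons]

-- every gap index is nonnegative
lemma pvIdx_nonneg (r : List Char) (pred : Int × Char → Bool) :
    ∀ x ∈ ((PySem.List.enumerate r 0).filter pred).map (fun q : Int × Char => q.1), 0 ≤ x := by
  intro x hx
  obtain ⟨q, hq, rfl⟩ := List.mem_map.mp hx
  have hq' := List.mem_of_mem_filter hq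
  rw [PySem.List.mem_enumerate_iff] at hq'
  obtain ⟨k, hk, rfl⟩ := hq'
  simp

-- the gap indices form a strictly increasing list
lemma pvIdx_pairwise (r : List Char) (pred : Int × Char → Bool) :
    (((PySem.List.enumerate r 0).filter pred).map (fun q : Int × Char => q.1)).Pairwise (· < ·) := by
  refine List.pairwise_map.mpr ?_
  exact List.Pairwise.filter _ (PySem.List.pairwise_lt_enumerate r 0)

lemma pvCountP_mono (idx : List Int) (c b : Int) (h : c ≤ b) :
    idx.countP (fun x => decide (x < c)) ≤ idx.countP (fun x => decide (x < b)) := by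
  apply List.countP_mono_left
  intro x _ hx
  simp only [decide_eq_true_eq] at *
  omega

-- the two-pointer advance on the not-yet-consumed suffix computes the count delta
lemma pvAdvance_spec (idx : List Int) (hidx : idx.Pairwise (· < ·)) (c b : Int) (hcb : c ≤ b) :
    pvAdvance b (idx.filter (fun x => !decide (x < c)))
      = (idx.countP (fun x => decide (x < b)) - idx.countP (fun x => decide (x < c)),
         idx.filter (fun x => !decide (x < b))) := by
  induction idx with
  | nil => simp [pvAdvance]
  | cons x rest ih =>
    have hrest := (List.pairwise_cons.mp hidx).2
    have hx := (List.pairwise_cons.mp hidx).1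
    by_cases h1 : x < c
    · have h2 : x < b := by omega
      have e1 : (x :: rest).filter (fun y => !decide (y < c)) = rest.filter (fun y => !decide (y < c)) := by simp [h1]
      have e2 : (x :: rest).filter (fun y => !decide (y < b)) = rest.filter (fun y => !decide (y < b)) := by simp [h2]
      have e3 : (x :: rest).countP (fun y => decide (y < b)) = rest.countP (fun y => decide (y < b)) + 1 := by simp [h2]
      have e4 : (x :: rest).countP (fun y => decide (y < c)) = rest.countP (fun y => decide (y < c)) + 1 := by simp [h1]
      rw [e1, e2, e3, e4, ih hrest, Prod.mk.injEq]
      exact ⟨by omega, rfl⟩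
    · by_cases h2 : x < b
      · have hm := pvCountP_mono rest c b hcb
        have e1 : (x :: rest).filter (fun y => !decide (y < c)) = x :: rest.filter (fun y => !decide (y < c)) := by simp [h1]
        have e2 : (x :: rest).filter (fun y => !decide (y < b)) = rest.filter (fun y => !decide (y < b)) := by simp [h2]
        have e3 : (x :: rest).countP (fun y => decide (y < b)) = rest.countP (fun y => decide (y < b)) + 1 := by simp [h2]
        have e4 : (x :: rest).countP (fun y => decide (y < c)) = rest.countP (fun y => decide (y < c)) := by simp [h1]
        rw [e1, e2, e3, e4]
        simp only [pvAdvance, if_pos h2]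
        rw [ih hrest, Prod.mk.injEq]
        exact ⟨by omega, rfl⟩
      · -- b ≤ x: everything in x :: rest is ≥ x ≥ b ≥ c — nothing moves
        have hall : ∀ y ∈ x :: rest, ¬ y < b ∧ ¬ y < c := by
          intro y hy
          rcases List.mem_cons.mp hy with rfl | hy
          · omega
          · have := hx y hy; omega
        have hfc : (x :: rest).filter (fun y => !decide (y < c)) = x :: rest := by
          apply List.filter_eq_self.mpr
          intro y hy; simpa using (hall y hy).2
        have hfb : (x :: rest).filter (fun y => !decide (y < b)) = x :: rest := by
          apply List.filter_eq_self.mpr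
          intro y hy; simpa using (hall y hy).1
        have hcc : (x :: rest).countP (fun y => decide (y < c)) = 0 := by
          apply List.countP_eq_zero.mpr
          intro y hy; simpa using (hall y hy).2
        have hcb' : (x :: rest).countP (fun y => decide (y < b)) = 0 := by
          apply List.countP_eq_zero.mpr
          intro y hy; simpa using (hall y hy).1
        rw [hfc, hfb, hcc, hcb']
        simp [pvAdvance, h2]

-- loop invariant: B's fold, started with the gap suffix and count at cursor c, yields A's fold
lemma pvLoop (s : List Char) (idx : List Int) (hidx : idx.Pairwise (· < ·)) :
    ∀ (ps : List Int) (c : Int) (acc : List Int),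
      (∀ p ∈ ps, c ≤ p + 1) → ps.Pairwise (· ≤ ·) →
      (ps.foldl (fun (st : List Int × Int × List Int) p =>
          if p ≠ (s.length : Int) - 3 ∧
             PySem.List.slice s (some p) (some (p + 3)) ∈ ["TAA".toList, "TAG".toList, "TGA".toList] then
            ((pvAdvance (p + 1) st.1).2, st.2.1 + ((pvAdvance (p + 1) st.1).1 : Int),
              st.2.2 ++ [p + 1 - (st.2.1 + ((pvAdvance (p + 1) st.1).1 : Int))])
          else ((pvAdvance (p + 1) st.1).2, st.2.1 + ((pvAdvance (p + 1) st.1).1 : Int), st.2.2))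
        (idx.filter (fun x => !decide (x < c)), ((idx.countP (fun x => decide (x < c)) : Nat) : Int), acc)).2.2
      = ps.foldl (fun stop_list p =>
          if p ≠ (s.length : Int) - 3 then
            if PySem.List.slice s (some p) (some (p + 3)) = "TAA".toList ∨
               PySem.List.slice s (some p) (some (p + 3)) = "TAG".toList ∨
               PySem.List.slice s (some p) (some (p + 3)) = "TGA".toList then
              stop_list ++ [p + 1 - ((idx.filter (fun x => decide (x < p + 1))).length : Int)]
            else stop_list
          else stop_list) acc := by
  intro ps
  induction ps with
  | nil => intro c acc _ _; rfl
  | cons p rest ih =>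
    intro c acc hge hpw
    have hc : c ≤ p + 1 := hge p (List.mem_cons_self ..)
    have hmono := pvCountP_mono idx c (p + 1) hc
    have hrest_ge : ∀ q ∈ rest, p + 1 ≤ q + 1 := by
      intro q hq
      have := (List.pairwise_cons.mp hpw).1 q hq
      omega
    have hrest_pw := (List.pairwise_cons.mp hpw).2
    have hrem : (idx.countP (fun x => decide (x < c)) : Int) +
        ((idx.countP (fun x => decide (x < p + 1)) - idx.countP (fun x => decide (x < c)) : Nat) : Int)
        = ((idx.countP (fun x => decide (x < p + 1)) : Nat) : Int) := by
      push_cast [Nat.cast_sub hmono]; ring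
    have hlen : ((idx.filter (fun x => decide (x < p + 1))).length : Int)
        = ((idx.countP (fun x => decide (x < p + 1)) : Nat) : Int) := by
      rw [List.countP_eq_length_filter]
    simp only [List.foldl_cons]
    rw [pvAdvance_spec idx hidx c (p + 1) hc, hrem]
    by_cases h1 : p = (s.length : Int) - 3
    · rw [if_neg (fun hcon => hcon.1 h1), if_neg (not_not_intro h1)]
      exact ih (p + 1) acc hrest_ge hrest_pw
    · by_cases h2 : PySem.List.slice s (some p) (some (p + 3)) = "TAA".toList ∨
          PySem.List.slice s (some p) (some (p + 3)) = "TAG".toList ∨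
          PySem.List.slice s (some p) (some (p + 3)) = "TGA".toList
      · have hmem : PySem.List.slice s (some p) (some (p + 3)) ∈
            ["TAA".toList, "TAG".toList, "TGA".toList] := by simpa using h2
        rw [if_pos ⟨h1, hmem⟩, if_pos h1, if_pos h2, hlen]
        exact ih (p + 1) (acc ++ [p + 1 - ((idx.countP (fun x => decide (x < p + 1)) : Nat) : Int)]) hrest_ge hrest_pw
      · have hmem : ¬ PySem.List.slice s (some p) (some (p + 3)) ∈
            ["TAA".toList, "TAG".toList, "TGA".toList] := by simpa using h2
        rw [if_neg (fun hcon => hmem hcon.2), if_pos h1, if_neg h2]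
        exact ih (p + 1) acc hrest_ge hrest_pw

-- the codon positions returned by range(0, n, 3) are nondecreasing
lemma pvRange_pairwise (n : Int) : (PySem.List.pyRange 0 n 3).Pairwise (· ≤ ·) := by
  rw [PySem.List.pyRange_of_pos 0 n (by norm_num)]
  refine List.pairwise_map.mpr ?_
  refine (List.pairwise_lt_range).imp ?_
  intro a b hab
  omega

-- ===== VERDICT (by name: the statement is the Claim_ definition above) =====
theorem find_stop_codon2_spec : Claim_equal_find_stop_codon2 := by
  intro seq1 refseq2 _ _
  unfold Spec_find_stop_codon2
  simp only [find_stop_codon2, find_stop_codon2_alt, pvStart_eq]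
  generalize hIdx :
    ((PySem.List.enumerate refseq2.toList 0).filter (fun q : Int × Char => q.2 == '-' &&
        decide ((((refseq2.toList.findIdx? (fun c => c != '-')).getD refseq2.toList.length : Nat) : Int) < q.1))).map
      (fun x : Int × Char => x.1) = idx
  have hpair : idx.Pairwise (· < ·) := hIdx ▸ pvIdx_pairwise refseq2.toList _
  have hnn : ∀ x ∈ idx, 0 ≤ x := hIdx ▸ pvIdx_nonneg refseq2.toList _
  have hfilter : idx.filter (fun x => !decide (x < 0)) = idx :=
    List.filter_eq_self.mpr (fun y hy => by
      have := hnn y hy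
      simpa using this)
  have hcnt : idx.countP (fun x => decide (x < 0)) = 0 :=
    List.countP_eq_zero.mpr (fun y hy => by
      have := hnn y hy
      simp only [decide_eq_true_eq]
      omega)
  have hmem0 : ∀ p ∈ PySem.List.pyRange 0 (seq1.toList.length : Int) 3, (0:Int) ≤ p + 1 := by
    intro p hp
    have := (PySem.List.mem_pyRange_iff_of_pos (by norm_num : (0:Int) < 3) p).mp hp
    omega
  have hmain := pvLoop seq1.toList idx hpair
    (PySem.List.pyRange 0 (seq1.toList.length : Int) 3) 0 [] hmem0 (pvRange_pairwise _)
  rw [hfilter, hcnt] at hmain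
  simp only [Nat.cast_zero] at hmain
  exact hmain.symm
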